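-- pv_equiv track=rewrite | github.com/cpendergraft98/UO-Coursework | CIS 211 - Computer Science 2/Projects-Mini/waldo-mini-master/waldo.py | all_col_exists_waldo
-- ===== SOURCE A (Python) =====
-- def all_col_exists_waldo(collection) -> bool:  #Done #Tricky
--     exists = True
--     if len(collection) == 0:
--         return True
--     for col in range(len(collection[0])):
--         value = 0
--         for row in range(len(collection)):
--             if collection[row][col] == 'W':
--                 value += 1
--         if value >= 1:
--             exists = True
--         else:
--             return False
--     return exists
-- ===== SOURCE B (Python) =====
-- def all_col_exists_waldo(collection) -> bool:
--     if len(collection) == 0: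
--         return True
--     ncols = len(collection[0])
--     seen = set()
--     for row in collection:
--         for col in range(ncols):
--             if row[col] == 'W':
--                 seen.add(col)
--     return len(seen) == ncols
-- ===== Notes on version B (the rewrite author's own statement) =====
-- stated objective: alternative
-- what changed: Replaces A's column-major double loop (per-column count of W's with early return) by a single row-major pass that collects the satisfied column indices in a set and compares its size to the number of columns at the end.
-- outside the precondition, e.g. on all_col_exists_waldo([['x', 'y'], ['x']]): A returns False, B raises IndexError
import Mathlib
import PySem

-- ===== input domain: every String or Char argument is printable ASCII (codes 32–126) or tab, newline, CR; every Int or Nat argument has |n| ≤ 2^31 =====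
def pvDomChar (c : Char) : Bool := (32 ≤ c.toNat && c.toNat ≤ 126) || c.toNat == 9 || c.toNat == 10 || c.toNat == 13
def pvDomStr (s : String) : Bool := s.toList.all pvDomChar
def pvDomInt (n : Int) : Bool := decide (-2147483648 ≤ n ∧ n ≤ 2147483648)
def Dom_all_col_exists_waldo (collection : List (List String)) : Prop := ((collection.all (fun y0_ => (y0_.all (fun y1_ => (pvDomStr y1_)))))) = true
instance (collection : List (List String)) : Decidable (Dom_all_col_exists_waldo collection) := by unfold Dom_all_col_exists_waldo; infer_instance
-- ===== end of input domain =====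

-- B replaces A's column-major count-and-early-return loops by one row-major pass
-- collecting satisfied columns in a set (objective: alternative; equal return value on Pre_).

-- ===== PORT A =====
-- inner 'for row in range(len(collection))' loop: counts rows with collection[row][col] == 'W'.
-- Indexing is ported with getD; exact under Pre_ (all indices are then in range).
def waldoColCount (collection : List (List String)) (col : Nat) : Nat :=
  (List.range collection.length).foldl
    (fun value row => if (collection.getD row []).getD col "" == "W" then value + 1 else value) 0

-- outer 'for col in range(len(collection[0]))' loop with the early 'return False'
def waldoLoop (collection : List (List String)) : List Nat → Bool
  | [] => true
  | col :: rest => if waldoColCount collection col ≥ 1 then waldoLoop collection rest else false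

def all_col_exists_waldo (collection : List (List String)) : Bool :=
  if collection.length == 0 then true
  else waldoLoop collection (List.range (collection.headD []).length)

-- ===== PORT B =====
def all_col_exists_waldo_alt (collection : List (List String)) : Bool :=
  if collection.length == 0 then true
  else
    let ncols := (collection.headD []).length
    let seen : PySem.Set Nat :=
      collection.foldl
        (fun seen row =>
          (List.range ncols).foldl
            (fun seen col => if row.getD col "" == "W" then PySem.Set.add seen col else seen)
            seen)
        PySem.Set.empty
    PySem.Set.len seen == (ncols : Int)

-- ===== PRECONDITION & SPEC =====
-- Pre_ excludes ragged collections (some row shorter than the first row): there Python A either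
-- raises IndexError or returns False only via an early return hit before the short row, while B raises.
def Pre_all_col_exists_waldo (collection : List (List String)) : Prop :=
  ∀ row ∈ collection, (collection.headD []).length ≤ row.length
instance (collection : List (List String)) : Decidable (Pre_all_col_exists_waldo collection) := by unfold Pre_all_col_exists_waldo; infer_instance
def pvWitness_all_col_exists_waldo : List (List String) := [["W", "x"], ["y", "W"]]
def Spec_all_col_exists_waldo (collection : List (List String)) (out : Bool) : Prop := out = all_col_exists_waldo_alt collection
instance (collection : List (List String)) (out : Bool) : Decidable (Spec_all_col_exists_waldo collection out) := by unfold Spec_all_col_exists_waldo; infer_instance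

-- ===== CLAIM (what is proved, stated in full; the proofs are below) =====
def Claim_equal_all_col_exists_waldo : Prop := ∀ (collection : List (List String)), Dom_all_col_exists_waldo collection → Pre_all_col_exists_waldo collection → Spec_all_col_exists_waldo collection (all_col_exists_waldo collection)

-- ===== LEMMAS AND PROOFS =====

-- the W-in-column test both programs make on a row
def waldoHit (col : Nat) (row : List String) : Bool := row.getD col "" == "W"

theorem waldo_foldl_count {α : Type} (p : α → Bool) (l : List α) (v : Nat) :
    l.foldl (fun v x => if p x then v + 1 else v) v = v + l.countP p := by
  induction l generalizing v with
  | nil => simp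
  | cons a l ih =>
    simp only [List.foldl_cons, List.countP_cons, ih]
    by_cases h : p a = true
    · simp [h]; omega
    · simp [h]

theorem waldoColCount_eq_countP (collection : List (List String)) (col : Nat) :
    waldoColCount collection col
      = (List.range collection.length).countP (fun row => waldoHit col (collection.getD row [])) := by
  unfold waldoColCount waldoHit
  exact (waldo_foldl_count (fun row => (collection.getD row []).getD col "" == "W")
    (List.range collection.length) 0).trans (Nat.zero_add _)

theorem waldo_getD_eq {α : Type} (d : α) (l : List α) {i : Nat} (hi : i < l.length) :
    l.getD i d = l[i] := by
  simp [List.getD_eq_getElem?_getD, List.getElem?_eq_getElem hi]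

theorem waldo_exists_range_getD {α : Type} (d : α) (l : List α) (p : α → Bool) :
    (∃ i ∈ List.range l.length, p (l.getD i d)) ↔ ∃ x ∈ l, p x := by
  constructor
  · rintro ⟨i, hi, hp⟩
    rw [List.mem_range] at hi
    exact ⟨l[i], List.getElem_mem hi, by rwa [waldo_getD_eq d l hi] at hp⟩
  · rintro ⟨x, hx, hp⟩
    obtain ⟨i, hi, rfl⟩ := List.mem_iff_getElem.mp hx
    exact ⟨i, List.mem_range.mpr hi, by rwa [waldo_getD_eq d l hi]⟩

theorem waldoColCount_pos_iff (collection : List (List String)) (col : Nat) :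
    (waldoColCount collection col ≥ 1) ↔ collection.any (fun row => waldoHit col row) = true := by
  rw [waldoColCount_eq_countP, List.any_eq_true]
  have hpos := List.countP_pos_iff (p := fun row => waldoHit col (collection.getD row []))
      (l := List.range collection.length)
  constructor
  · intro h
    exact (waldo_exists_range_getD [] collection (waldoHit col)).mp (hpos.mp (by omega))
  · intro h
    have := hpos.mpr ((waldo_exists_range_getD [] collection (waldoHit col)).mpr h)
    omega

theorem waldoLoop_eq_all (collection : List (List String)) (cols : List Nat) :
    waldoLoop collection cols
      = cols.all (fun col => collection.any (fun row => waldoHit col row)) := by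
  induction cols with
  | nil => rfl
  | cons c cols ih =>
    simp only [waldoLoop, List.all_cons]
    by_cases h : waldoColCount collection c ≥ 1
    · simp [h, (waldoColCount_pos_iff collection c).mp h, ih]
    · have hfalse : collection.any (fun row => waldoHit c row) = false := by
        rcases Bool.eq_false_or_eq_true (collection.any fun row => waldoHit c row) with h' | h'
        · exact absurd ((waldoColCount_pos_iff collection c).mpr h') h
        · exact h'
      simp [h, hfalse]

theorem waldo_inner_spec (row : List String) (cols : List Nat) (s : PySem.Set Nat)
    (hnd : s.Nodup) :
    (cols.foldl (fun seen col => if row.getD col "" == "W" then PySem.Set.add seen col else seen) s).Nodup ∧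
    ∀ y, y ∈ cols.foldl (fun seen col => if row.getD col "" == "W" then PySem.Set.add seen col else seen) s
        ↔ y ∈ s ∨ (y ∈ cols ∧ waldoHit y row = true) := by
  induction cols generalizing s with
  | nil => simp [hnd]
  | cons c cols ih =>
    by_cases hw : (row.getD c "" == "W") = true
    · obtain ⟨h1, h2⟩ := ih (PySem.Set.add s c) (PySem.Set.nodup_add s c hnd)
      refine ⟨?_, fun y => ?_⟩
      · simp only [List.foldl_cons]; rw [if_pos hw]; exact h1
      · simp only [List.foldl_cons]
        rw [if_pos hw, h2 y, PySem.Set.mem_add]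
        constructor
        · rintro ((hs | rfl) | ⟨hc, hh⟩)
          · exact Or.inl hs
          · exact Or.inr ⟨List.mem_cons_self, by simpa [waldoHit] using hw⟩
          · exact Or.inr ⟨List.mem_cons_of_mem _ hc, hh⟩
        · rintro (hs | ⟨hc, hh⟩)
          · exact Or.inl (Or.inl hs)
          · rcases List.mem_cons.mp hc with rfl | hc
            · exact Or.inl (Or.inr rfl)
            · exact Or.inr ⟨hc, hh⟩
    · obtain ⟨h1, h2⟩ := ih s hnd
      refine ⟨?_, fun y => ?_⟩
      · simp only [List.foldl_cons]; rw [if_neg hw]; exact h1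
      · simp only [List.foldl_cons]
        rw [if_neg hw, h2 y]
        constructor
        · rintro (hs | ⟨hc, hh⟩)
          · exact Or.inl hs
          · exact Or.inr ⟨List.mem_cons_of_mem _ hc, hh⟩
        · rintro (hs | ⟨hc, hh⟩)
          · exact Or.inl hs
          · rcases List.mem_cons.mp hc with rfl | hc
            · exact absurd (by simpa [waldoHit] using hh) hw
            · exact Or.inr ⟨hc, hh⟩

theorem waldo_seen_spec (ncols : Nat) (rows : List (List String)) (s : PySem.Set Nat)
    (hnd : s.Nodup) :
    (rows.foldl
        (fun seen row =>
          (List.range ncols).foldl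
            (fun seen col => if row.getD col "" == "W" then PySem.Set.add seen col else seen)
            seen) s).Nodup ∧
    ∀ y, y ∈ rows.foldl
        (fun seen row =>
          (List.range ncols).foldl
            (fun seen col => if row.getD col "" == "W" then PySem.Set.add seen col else seen)
            seen) s ↔ (y ∈ s ∨ (y < ncols ∧ ∃ row ∈ rows, waldoHit y row = true)) := by
  induction rows generalizing s with
  | nil => simp [hnd]
  | cons r rows ih =>
    obtain ⟨hn1, hm1⟩ := waldo_inner_spec r (List.range ncols) s hnd
    obtain ⟨hn2, hm2⟩ := ih _ hn1
    refine ⟨hn2, fun y => ?_⟩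
    simp only [List.foldl_cons]
    rw [hm2 y, hm1 y]
    simp only [List.mem_range, List.mem_cons]
    constructor
    · rintro ((hs | ⟨hlt, hh⟩) | ⟨hlt, row, hr, hh⟩)
      · exact Or.inl hs
      · exact Or.inr ⟨hlt, r, Or.inl rfl, hh⟩
      · exact Or.inr ⟨hlt, row, Or.inr hr, hh⟩
    · rintro (hs | ⟨hlt, row, (rfl | hr), hh⟩)
      · exact Or.inl (Or.inl hs)
      · exact Or.inl (Or.inr ⟨hlt, hh⟩)
      · exact Or.inr ⟨hlt, row, hr, hh⟩

theorem waldo_len_iff (n : Nat) (s : List Nat) (hnd : s.Nodup) (hlt : ∀ y ∈ s, y < n) :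
    s.length = n ↔ ∀ c < n, c ∈ s := by
  have hsub : s.toFinset ⊆ Finset.range n := by
    intro x hx
    exact Finset.mem_range.mpr (hlt x (List.mem_toFinset.mp hx))
  have hcard : s.toFinset.card = s.length := List.toFinset_card_of_nodup hnd
  constructor
  · intro hlen c hc
    have heq : s.toFinset = Finset.range n :=
      Finset.eq_of_subset_of_card_le hsub (by simp [hcard, hlen])
    exact List.mem_toFinset.mp (heq ▸ Finset.mem_range.mpr hc)
  · intro h
    have hsub2 : Finset.range n ⊆ s.toFinset := by
      intro c hc
      exact List.mem_toFinset.mpr (h c (Finset.mem_range.mp hc))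
    have h1 := Finset.card_le_card hsub
    have h2 := Finset.card_le_card hsub2
    simp only [hcard, Finset.card_range] at h1 h2
    omega

-- A's loop over all columns returns true iff every column has a W
theorem waldo_A_iff (collection : List (List String)) (n : Nat) :
    (waldoLoop collection (List.range n) = true)
      ↔ ∀ c < n, ∃ row ∈ collection, waldoHit c row = true := by
  rw [waldoLoop_eq_all, List.all_eq_true]
  constructor
  · intro h c hc
    simpa [List.any_eq_true] using h c (List.mem_range.mpr hc)
  · intro h c hc
    simpa [List.any_eq_true] using h c (List.mem_range.mp hc)

-- B's final size test holds iff every column has a W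
theorem waldo_B_iff (n : Nat) (collection : List (List String)) :
    ((PySem.Set.len (collection.foldl
        (fun seen row =>
          (List.range n).foldl
            (fun seen col => if row.getD col "" == "W" then PySem.Set.add seen col else seen)
            seen) PySem.Set.empty) == (n : Int)) = true)
      ↔ ∀ c < n, ∃ row ∈ collection, waldoHit c row = true := by
  obtain ⟨hnd, hmem⟩ := waldo_seen_spec n collection PySem.Set.empty List.nodup_nil
  have hlt : ∀ y ∈ collection.foldl
      (fun seen row =>
        (List.range n).foldl
          (fun seen col => if row.getD col "" == "W" then PySem.Set.add seen col else seen)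
          seen) PySem.Set.empty, y < n := by
    intro y hy
    rcases (hmem y).mp hy with hs | ⟨hl, _⟩
    · exact absurd hs (List.not_mem_nil)
    · exact hl
  have hlen := waldo_len_iff n _ hnd hlt
  rw [beq_iff_eq]
  unfold PySem.Set.len
  rw [Nat.cast_inj, hlen]
  constructor
  · intro h c hc
    rcases (hmem c).mp (h c hc) with hs | ⟨_, row, hr, hh⟩
    · exact absurd hs (List.not_mem_nil)
    · exact ⟨row, hr, hh⟩
  · intro h c hc
    obtain ⟨row, hr, hh⟩ := h c hc
    exact (hmem c).mpr (Or.inr ⟨hc, row, hr, hh⟩)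

-- ===== VERDICT (by name: the statement is the Claim_ definition above) =====
theorem all_col_exists_waldo_spec : Claim_equal_all_col_exists_waldo := by
  intro collection _ _
  unfold Spec_all_col_exists_waldo all_col_exists_waldo all_col_exists_waldo_alt
  by_cases h0 : (collection.length == 0) = true
  · rw [if_pos h0, if_pos h0]
  · rw [if_neg h0, if_neg h0, Bool.eq_iff_iff]
    exact (waldo_A_iff collection _).trans (waldo_B_iff _ collection).symm
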